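-- pv_equiv track=rewrite | github.com/hacerkarayilan/PYTHON | n_copies.py | n_copies
-- ===== SOURCE A (Python) =====
-- def n_copies(list):
--     count=len(list)
--     count1=0
--     count2=0
--     for i in range(0,len(list)):
--         x=list[i]
--         if x>0:
--             count1+=x
--     list1=[0]*count1
--     for j in range(0,len(list)):
--         y=list[j]
--         if y>0:
--             for k in range(count2,count2+y):
--                 list1[k]=list[j]
--
--             count2+=y
--     return list1
-- ===== SOURCE B (Python) =====
-- def n_copies(list):
--     # Flat state machine: one while loop, two cursors (element index i,
--     # copies-emitted counter k), exactly one append per productive step.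
--     # No inner loop, no pre-summing pass, no preallocation.
--     out = []
--     i = 0
--     k = 0
--     while i < len(list):
--         x = list[i]
--         if k < x:
--             out.append(x)
--             k += 1
--         else:
--             i += 1
--             k = 0
--     return out
-- ===== Notes on version B (the rewrite author's own statement) =====
-- stated objective: alternative
-- what changed: A's staged scheme (pre-sum the positives, preallocate a zero list, fill it by index with nested loops and a running offset) is replaced by a flat state machine: one while loop over the pair of cursors (element index i, copies-emitted counter k) that appends exactly one element per productive iteration and never has an inner loop, a length pre-pass or index arithmetic.
import Mathlib
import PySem

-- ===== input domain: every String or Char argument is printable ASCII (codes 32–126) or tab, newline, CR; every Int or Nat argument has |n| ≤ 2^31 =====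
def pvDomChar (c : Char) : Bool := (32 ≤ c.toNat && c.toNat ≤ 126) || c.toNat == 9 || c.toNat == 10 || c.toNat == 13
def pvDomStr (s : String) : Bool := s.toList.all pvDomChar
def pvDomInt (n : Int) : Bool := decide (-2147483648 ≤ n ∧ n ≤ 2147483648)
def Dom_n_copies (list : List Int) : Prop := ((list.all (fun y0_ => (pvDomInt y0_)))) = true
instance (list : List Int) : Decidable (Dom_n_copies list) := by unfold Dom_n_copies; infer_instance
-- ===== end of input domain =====

-- B replaces A's staged count/preallocate/index-fill scheme by a flat state-machine
-- loop over cursors (i, k) that appends one element per step — alternative, same behaviour.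


-- ===== PORT A =====
-- Literal port: count1 pass over range(0,len(list)), preallocated [0]*count1,
-- then an index-fill pass with running offset count2.  All indices read/written are
-- in range, so pyGetD/pySetD are exact here.
def n_copies (list : List Int) : List Int :=
  let _count : Int := list.length
  let count1 : Int :=
    (PySem.List.pyRange 0 (list.length : Int) 1).foldl
      (fun c1 i =>
        if PySem.List.pyGetD list i 0 > 0 then c1 + PySem.List.pyGetD list i 0 else c1) 0
  let list1 : List Int := List.replicate count1.toNat 0
  let s :=
    (PySem.List.pyRange 0 (list.length : Int) 1).foldl
      (fun (s : List Int × Int) j =>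
        if PySem.List.pyGetD list j 0 > 0 then
          ((PySem.List.pyRange s.2 (s.2 + PySem.List.pyGetD list j 0) 1).foldl
             (fun l1 k => PySem.List.pySetD l1 k (PySem.List.pyGetD list j 0)) s.1,
           s.2 + PySem.List.pyGetD list j 0)
        else s)
      (list1, (0 : Int))
  s.1

-- ===== PORT B =====
-- Port of Source B's single while loop: state (i, k, out); each iteration either emits one
-- copy of list[i] (k += 1) or advances the element cursor (i += 1, k = 0).
def nloopB (list : List Int) (i k : Nat) (out : List Int) : List Int :=
  if h : i < list.length then
    if (k : Int) < list[i] then nloopB list i (k + 1) (out ++ [list[i]])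
    else nloopB list (i + 1) 0 out
  else out
termination_by (list.length - i, (list.getD i 0).toNat - k)
decreasing_by
  · have hx : list.getD i 0 = list[i] := List.getD_eq_getElem list 0 h
    have : k < (list.getD i 0).toNat := by rw [hx]; omega
    exact Prod.Lex.right _ (by omega)
  · exact Prod.Lex.left _ _ (by omega)

def n_copies_alt (list : List Int) : List Int := nloopB list 0 0 []

-- ===== PRECONDITION & SPEC =====
def Spec_n_copies (list : List Int) (out : List Int) : Prop := out = n_copies_alt list
instance (list : List Int) (out : List Int) : Decidable (Spec_n_copies list out) := by unfold Spec_n_copies; infer_instance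

-- ===== CLAIM (what is proved, stated in full; the proofs are below) =====
def Claim_equal_n_copies : Prop := ∀ (list : List Int), Dom_n_copies list → Spec_n_copies list (n_copies list)

-- ===== LEMMAS AND PROOFS =====

def pvGen (x : Int) : List Int := if x > 0 then List.replicate x.toNat x else []

lemma pvGen_eq (x : Int) : pvGen x = List.replicate x.toNat x := by
  unfold pvGen
  split_ifs with h
  · rfl
  · have : x.toNat = 0 := by omega
    simp [this]

lemma pv_flat_drop (list : List Int) (j : Nat) :
    (list.drop j).flatMap pvGen
      = if h : j < list.length then
          List.replicate (list[j].toNat) list[j] ++ (list.drop (j+1)).flatMap pvGen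
        else [] := by
  split_ifs with h
  · rw [List.drop_eq_getElem_cons h, List.flatMap_cons, pvGen_eq]
  · rw [List.drop_eq_nil_of_le (by omega)]
    simp

lemma pv_nloopB_eq (list : List Int) : ∀ (i k : Nat) (out : List Int),
    nloopB list i k out
      = out ++ (if h : i < list.length then
          List.replicate (list[i].toNat - k) list[i] ++ (list.drop (i+1)).flatMap pvGen
        else []) := by
  intro i k out
  induction i, k, out using nloopB.induct list with
  | case1 i k out h hk ih =>
    rw [nloopB, dif_pos h, if_pos hk, ih]
    simp only [dif_pos h]
    have hrep : list[i].toNat - k = (list[i].toNat - (k+1)) + 1 := by omega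
    rw [hrep, List.replicate_succ]
    simp
  | case2 i k out h hk ih =>
    simp only [Nat.sub_zero] at ih
    rw [nloopB, dif_pos h, if_neg hk, ih, ← pv_flat_drop list (i+1)]
    have h0 : list[i].toNat - k = 0 := by omega
    rw [dif_pos h, h0]
    simp
  | case3 i k out h =>
    rw [nloopB]
    simp [h]

lemma pv_alt_eq_flatMap (list : List Int) :
    n_copies_alt list = list.flatMap pvGen := by
  unfold n_copies_alt
  rw [pv_nloopB_eq list 0 0 []]
  simp only [Nat.sub_zero]
  rw [← pv_flat_drop list 0]
  simp

lemma pv_sum_pos (l : List Int) : ∀ (a : Int),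
    l.foldl (fun c x => if x > 0 then c + x else c) a
      = a + ((l.flatMap pvGen).length : Int) := by
  induction l with
  | nil => intro a; simp
  | cons y r ih =>
    intro a
    by_cases hy : y > 0
    · simp [pvGen, hy, ih, Int.toNat_of_nonneg (le_of_lt hy)]
      ring
    · simp [pvGen, hy, ih]

lemma pv_fill (n : Nat) : ∀ (done zeros : List Int) (v : Int), n ≤ zeros.length →
    (PySem.List.pyRange (done.length : Int) ((done.length : Int) + n) 1).foldl
        (fun l1 k => PySem.List.pySetD l1 k v) (done ++ zeros)
      = done ++ List.replicate n v ++ zeros.drop n := by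
  induction n with
  | zero =>
    intro done zeros v _
    rw [PySem.List.pyRange_one_eq_nil (by omega)]
    simp
  | succ n ih =>
    intro done zeros v hlen
    cases zeros with
    | nil => simp at hlen
    | cons z zs =>
      rw [PySem.List.pyRange_one_cons (by omega)]
      simp only [List.foldl_cons, PySem.List.pySetD_natCast]
      have hset : (done ++ z :: zs).set done.length v = (done ++ [v]) ++ zs := by
        simp
      rw [hset]
      have harg : (done.length : Int) + 1 = ((done ++ [v]).length : Int) := by
        simp
      have harg2 : (done.length : Int) + (n + 1 : Nat)
          = ((done ++ [v]).length : Int) + n := by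
        simp; ring
      rw [harg2, harg, ih (done ++ [v]) zs v (by simpa using Nat.le_of_succ_le_succ hlen)]
      simp [List.replicate_succ]

lemma pv_loop_inv : ∀ (rest done : List Int),
    (rest.foldl
        (fun (s : List Int × Int) y =>
          if y > 0 then
            ((PySem.List.pyRange s.2 (s.2 + y) 1).foldl
               (fun l1 k => PySem.List.pySetD l1 k y) s.1,
             s.2 + y)
          else s)
        (done ++ List.replicate (rest.flatMap pvGen).length 0, (done.length : Int))).1
      = done ++ rest.flatMap pvGen := by
  intro rest
  induction rest with
  | nil => intro done; simp
  | cons y r ih =>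
    intro done
    by_cases hy : y > 0
    · have hflat : ((y :: r).flatMap pvGen).length
          = y.toNat + (r.flatMap pvGen).length := by
        simp [pvGen, hy]
      rw [List.foldl_cons]
      simp only [hy, if_pos]
      have hrep : List.replicate ((y :: r).flatMap pvGen).length (0 : Int)
          = List.replicate y.toNat 0 ++ List.replicate (r.flatMap pvGen).length 0 := by
        rw [hflat, List.replicate_add]
      have hy' : (done.length : Int) + y = (done.length : Int) + (y.toNat : Int) := by
        rw [Int.toNat_of_nonneg (le_of_lt hy)]
      have hfill := pv_fill y.toNat done
        (List.replicate y.toNat 0 ++ List.replicate (r.flatMap pvGen).length 0) y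
        (by simp)
      rw [hrep, hy', hfill]
      have hdrop : (List.replicate y.toNat (0:Int)
            ++ List.replicate (r.flatMap pvGen).length 0).drop y.toNat
          = List.replicate (r.flatMap pvGen).length 0 := by
        simp
      rw [hdrop]
      have hnew : done ++ List.replicate y.toNat y
            ++ List.replicate (r.flatMap pvGen).length 0
          = (done ++ List.replicate y.toNat y)
            ++ List.replicate (r.flatMap pvGen).length 0 := by
        simp
      have hlen2 : (done.length : Int) + (y.toNat : Int)
          = ((done ++ List.replicate y.toNat y).length : Int) := by
        simp
      rw [hnew, hlen2, ih (done ++ List.replicate y.toNat y)]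
      simp [pvGen, hy]
    · rw [List.foldl_cons]
      simp only [hy, if_false]
      have hflat : ((y :: r).flatMap pvGen) = r.flatMap pvGen := by
        simp [pvGen, hy]
      rw [hflat, ih done]

lemma pv_A_eq_flatMap (list : List Int) : n_copies list = list.flatMap pvGen := by
  have hc : (PySem.List.pyRange 0 (list.length : Int) 1).foldl
      (fun c1 i =>
        if PySem.List.pyGetD list i 0 > 0 then c1 + PySem.List.pyGetD list i 0 else c1) 0
      = list.foldl (fun c x => if x > 0 then c + x else c) 0 :=
    PySem.List.foldl_pyRange_zero_pyGetD' list 0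
      (fun c x => if x > 0 then c + x else c) 0
  have hs : ∀ init : List Int × Int,
      (PySem.List.pyRange 0 (list.length : Int) 1).foldl
        (fun (s : List Int × Int) j =>
          if PySem.List.pyGetD list j 0 > 0 then
            ((PySem.List.pyRange s.2 (s.2 + PySem.List.pyGetD list j 0) 1).foldl
               (fun l1 k => PySem.List.pySetD l1 k (PySem.List.pyGetD list j 0)) s.1,
             s.2 + PySem.List.pyGetD list j 0)
          else s) init
      = list.foldl
        (fun (s : List Int × Int) y =>
          if y > 0 then
            ((PySem.List.pyRange s.2 (s.2 + y) 1).foldl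
               (fun l1 k => PySem.List.pySetD l1 k y) s.1,
             s.2 + y)
          else s) init :=
    fun init => PySem.List.foldl_pyRange_zero_pyGetD' list 0
      (fun (s : List Int × Int) y =>
        if y > 0 then
          ((PySem.List.pyRange s.2 (s.2 + y) 1).foldl
             (fun l1 k => PySem.List.pySetD l1 k y) s.1,
           s.2 + y)
        else s) init
  unfold n_copies
  simp only [hc, hs]
  rw [pv_sum_pos list 0]
  have h0 : ((0 : Int) + ((list.flatMap pvGen).length : Int)).toNat
      = (list.flatMap pvGen).length := by omega
  rw [h0]
  have h1 := pv_loop_inv list []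
  simp only [List.nil_append, List.length_nil, Nat.cast_zero] at h1
  rw [h1]

-- ===== VERDICT (by name: the statement is the Claim_ definition above) =====
theorem n_copies_spec : Claim_equal_n_copies := by
  intro list _
  show n_copies list = n_copies_alt list
  rw [pv_A_eq_flatMap, pv_alt_eq_flatMap]
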